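-- pv_equiv track=rewrite | github.com/adijunn/CS61A | Labs/lab01/lab01.py | double_eights
-- ===== SOURCE A (Python) =====
-- def double_eights(n):
--     """Return true if n has two eights in a row.
--     >>> double_eights(8)
--     False
--     >>> double_eights(88)
--     True
--     >>> double_eights(880088)
--     True
--     >>> double_eights(12345)
--     False
--     >>> double_eights(80808080)
--     False
--     """
--     "*** YOUR CODE HERE ***"
--     # if len((str)(n)) == 1:
--     #     return False
--     # if (str)(n)[:2] == '88':
--     #     return True
--     # else:
--     #     n = (str)(n)
--     #     new_n = int(n[1:])
--     #     return double_eights(new_n)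
--     if len(str(n)) == 1:
--         return False
--     order = 10**(len(str(n))-1)
--     order_1 = 10**(len(str(n))-2)
--     if (n // order) == 8 and ((n % order) // order_1) == 8:
--         return True
--     if len(str(n)) == 2:
--         return False
--
--     return double_eights(n % order)
-- ===== SOURCE B (Python) =====
-- def double_eights(n):
--     """Return true if n has two eights in a row (n a nonnegative integer).
--     Scans the digits from least significant to most significant, remembering
--     whether the previous digit was an 8."""
--     prev = False
--     while n > 0:
--         if n % 10 == 8:
--             if prev:
--                 return True
--             prev = True
--         else:
--             prev = False
--         n //= 10
--     return False
-- ===== Notes on version B (the rewrite author's own statement) =====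
-- stated objective: alternative
-- what changed: Replaced A's top-down recursion (recompute the decimal length and two powers of ten at every step, compare the two leading digits, recurse on the remainder below the leading digit) by a bottom-up while loop that repeatedly inspects the last decimal digit and floor-divides the number, carrying a previous-digit-was-an-eight flag; Pre_ restricts to the natural domain of nonnegative integers, since on negative inputs A's string-length arithmetic counts the minus sign as a digit position and the returned value is accidental.
-- outside the precondition, e.g. on double_eights(-12): A returns True, B returns False; on double_eights(-88): A returns False, B returns False
import Mathlib
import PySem

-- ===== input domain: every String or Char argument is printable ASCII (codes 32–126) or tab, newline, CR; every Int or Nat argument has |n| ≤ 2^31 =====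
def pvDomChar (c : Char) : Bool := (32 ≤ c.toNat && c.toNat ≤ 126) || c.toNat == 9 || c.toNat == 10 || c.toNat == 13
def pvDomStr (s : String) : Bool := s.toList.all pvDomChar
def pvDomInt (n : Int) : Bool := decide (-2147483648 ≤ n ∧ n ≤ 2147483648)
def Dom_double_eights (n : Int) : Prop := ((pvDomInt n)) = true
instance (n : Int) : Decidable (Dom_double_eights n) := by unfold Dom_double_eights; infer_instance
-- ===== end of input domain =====

-- B replaces A's top-down recursion on the decimal length and powers of ten by a
-- bottom-up scan of the decimal digits with a "previous digit was an eight" flag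
-- (objective: alternative). Pre_ restricts to the natural domain (see its comment).

-- ===== PORT A =====
-- termination helpers for the port (cited by `decreasing_by`)
lemma pv_tdc_succ (f n : Nat) (ds : List Char) :
    Nat.toDigitsCore 10 (f+1) n ds =
      if n / 10 = 0 then (n % 10).digitChar :: ds
      else Nat.toDigitsCore 10 f (n/10) ((n % 10).digitChar :: ds) := by
  rw [Nat.toDigitsCore]

lemma pv_tdc_fuel (n : Nat) : ∀ (f : Nat) (ds : List Char), n < f →
    Nat.toDigitsCore 10 f n ds = Nat.toDigitsCore 10 (n+1) n ds := by
  induction n using Nat.strong_induction_on with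
  | _ n ih =>
    intro f ds h
    obtain ⟨f, rfl⟩ : ∃ f', f = f' + 1 := ⟨f - 1, by omega⟩
    rw [pv_tdc_succ, pv_tdc_succ]
    by_cases h0 : n / 10 = 0
    · simp [h0]
    · simp only [h0, if_false]
      rw [ih (n/10) (by omega) f _ (by omega), ih (n/10) (by omega) n _ (by omega)]

lemma pv_toDigits_len_rec (m : Nat) :
    (Nat.toDigits 10 m).length =
      if m < 10 then 1 else (Nat.toDigits 10 (m/10)).length + 1 := by
  rw [Nat.toDigits, pv_tdc_succ]
  by_cases h : m < 10
  · simp [Nat.div_eq_of_lt h, h]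
  · have h0 : ¬ m / 10 = 0 := by omega
    simp only [h0, if_false, h]
    rw [pv_tdc_fuel (m/10) m _ (by omega)]
    rw [Nat.toDigitsCore_lens_eq]
    rfl

lemma pv_toDigits_len_pos (m : Nat) : 1 ≤ (Nat.toDigits 10 m).length := by
  rw [pv_toDigits_len_rec]; split <;> omega

lemma pv_toChars_len_pos (n : Int) : 1 ≤ (PySem.Int.toChars n).length := by
  unfold PySem.Int.toChars
  split
  · simp
  · exact pv_toDigits_len_pos _

lemma pv_toChars_mod_len_lt (n : Int) (s : Nat) (hs : s = (PySem.Int.toChars n).length)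
    (h3 : 3 ≤ s) :
    (PySem.Int.toChars (PySem.Int.mod n ((10:Int)^(s-1)))).length < s := by
  have hpow : (0:Int) < 10 ^ (s-1) := by positivity
  have h0 : 0 ≤ PySem.Int.mod n ((10:Int)^(s-1)) := Int.fmod_nonneg_of_pos n hpow
  have h1 : PySem.Int.mod n ((10:Int)^(s-1)) < 10 ^ (s-1) := Int.fmod_lt_of_pos n hpow
  set r := PySem.Int.mod n ((10:Int)^(s-1)) with hr
  have hch : PySem.Int.toChars r = Nat.toDigits 10 r.toNat := by
    unfold PySem.Int.toChars
    rw [if_neg (by omega)]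
  have hcast : ((10:Int)^(s-1)) = (((10:Nat)^(s-1) : Nat) : Int) := by push_cast; ring
  have hlt : r.toNat < 10 ^ (s-1) := by
    rw [hcast] at h1; omega
  have := Nat.toDigits_length 10 r.toNat (s-1) (by omega) hlt
  rw [hch]; omega

def double_eights (n : Int) : Bool :=
  let s := (PySem.Int.toChars n).length
  if s = 1 then false
  else
    let order : Int := (10 : Int) ^ (s - 1)
    let order_1 : Int := (10 : Int) ^ (s - 2)
    if PySem.Int.floordiv n order = 8 ∧
        PySem.Int.floordiv (PySem.Int.mod n order) order_1 = 8 then true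
    else if s = 2 then false
    else double_eights (PySem.Int.mod n order)
termination_by (PySem.Int.toChars n).length
decreasing_by
  exact pv_toChars_mod_len_lt n _ rfl (by have := pv_toChars_len_pos n; omega)

-- ===== PORT B =====
lemma pv_fdiv10_toNat_lt (n : Int) (h : 0 < n) : (PySem.Int.floordiv n 10).toNat < n.toNat := by
  unfold PySem.Int.floordiv
  have h2 : n.fdiv 10 = n / 10 := by rw [Int.fdiv_eq_ediv]; simp
  omega

def deLoop (n : Int) (prev : Bool) : Bool :=
  if 0 < n then
    if PySem.Int.mod n 10 = 8 then
      if prev then true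
      else deLoop (PySem.Int.floordiv n 10) true
    else deLoop (PySem.Int.floordiv n 10) false
  else false
termination_by n.toNat
decreasing_by
  · exact pv_fdiv10_toNat_lt n (by assumption)
  · exact pv_fdiv10_toNat_lt n (by assumption)

def double_eights_alt (n : Int) : Bool := deLoop n false

-- ===== PRECONDITION & SPEC =====
-- Pre_ restricts to the function's natural domain, nonnegative integers: on negative n,
-- A's len(str(n)) arithmetic counts the '-' sign as a digit position and the returned
-- value is accidental (e.g. A(-12) is True), so nothing is claimed there.
def Pre_double_eights (n : Int) : Prop := 0 ≤ n
instance (n : Int) : Decidable (Pre_double_eights n) := by unfold Pre_double_eights; infer_instance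
def pvWitness_double_eights : Int := (88)
def Spec_double_eights (n : Int) (out : Bool) : Prop := out = double_eights_alt n
instance (n : Int) (out : Bool) : Decidable (Spec_double_eights n out) := by unfold Spec_double_eights; infer_instance

-- ===== CLAIM (what is proved, stated in full; the proofs are below) =====
def Claim_equal_double_eights : Prop := ∀ (n : Int), Dom_double_eights n → Pre_double_eights n → Spec_double_eights n (double_eights n)

-- ===== LEMMAS AND PROOFS =====
-- "digits k and k+1 of m are both 8"
def pvPair (m k : Nat) : Prop := m / 10^k % 10 = 8 ∧ m / 10^(k+1) % 10 = 8
-- "m has two consecutive eights"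
def pvP (m : Nat) : Prop := ∃ k, pvPair m k

lemma pv_mod_cast (a b : Nat) : PySem.Int.mod (a : Int) (b : Int) = ((a % b : Nat) : Int) := by
  unfold PySem.Int.mod; exact (Int.ofNat_fmod a b).symm

lemma pv_fdiv_cast (a b : Nat) : PySem.Int.floordiv (a : Int) (b : Int) = ((a / b : Nat) : Int) := by
  unfold PySem.Int.floordiv; exact (Int.ofNat_fdiv a b).symm

lemma pv_mod_cast10 (a : Nat) : PySem.Int.mod (a : Int) 10 = ((a % 10 : Nat) : Int) := by
  exact_mod_cast pv_mod_cast a 10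

lemma pv_fdiv_cast10 (a : Nat) : PySem.Int.floordiv (a : Int) 10 = ((a / 10 : Nat) : Int) := by
  exact_mod_cast pv_fdiv_cast a 10

lemma pv_toChars_cast (m : Nat) : PySem.Int.toChars (m : Int) = Nat.toDigits 10 m := by
  unfold PySem.Int.toChars
  rw [if_neg (by omega)]
  simp

lemma pvPair_shift (m k : Nat) : pvPair (m/10) k ↔ pvPair m (k+1) := by
  unfold pvPair
  rw [Nat.div_div_eq_div_mul, Nat.div_div_eq_div_mul, ← pow_succ', ← pow_succ']

lemma pvP_rec (m : Nat) : pvP m ↔ (m % 10 = 8 ∧ (m/10) % 10 = 8) ∨ pvP (m/10) := by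
  constructor
  · rintro ⟨k, hk⟩
    match k with
    | 0 =>
      left
      obtain ⟨h1, h2⟩ := hk
      simp only [pow_zero, zero_add, pow_one, Nat.div_one] at h1 h2
      exact ⟨h1, h2⟩
    | k+1 => exact Or.inr ⟨k, (pvPair_shift m k).mpr hk⟩
  · rintro (⟨h1, h2⟩ | ⟨k, hk⟩)
    · exact ⟨0, by simpa [pvPair] using ⟨h1, h2⟩⟩
    · exact ⟨k+1, (pvPair_shift m k).mp hk⟩

lemma pv_deLoop_iff (m : Nat) : ∀ (prev : Bool),
    (deLoop (m : Int) prev = true) ↔ (pvP m ∨ (prev = true ∧ 0 < m ∧ m % 10 = 8)) := by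
  induction m using Nat.strong_induction_on with
  | _ m ih =>
    intro prev
    rw [deLoop]
    by_cases hm : 0 < m
    · rw [if_pos (by exact_mod_cast hm)]
      rw [pv_mod_cast10 m, pv_fdiv_cast10 m]
      have hdvd : m / 10 < m := Nat.div_lt_self hm (by omega)
      by_cases h8 : m % 10 = 8
      · rw [if_pos (by exact_mod_cast h8)]
        cases prev with
        | true => simp [hm, h8]
        | false =>
          simp only [Bool.false_eq_true, false_and, or_false, if_false]
          rw [ih (m/10) hdvd true]
          rw [pvP_rec m]
          constructor
          · rintro (h | ⟨_, h1, h2⟩)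
            · exact Or.inr h
            · exact Or.inl ⟨h8, h2⟩
          · rintro (⟨_, h2⟩ | h)
            · exact Or.inr ⟨rfl, by omega, h2⟩
            · exact Or.inl h
      · rw [if_neg (by exact_mod_cast h8)]
        rw [ih (m/10) hdvd false]
        rw [pvP_rec m]
        simp [h8]
    · rw [if_neg (by exact_mod_cast hm)]
      have hm0 : m = 0 := by omega
      subst hm0
      constructor
      · intro h; cases h
      · rintro (⟨k, h1, h2⟩ | ⟨_, h, _⟩)
        · simp [Nat.zero_div] at h1
        · omega

-- exact digit-length bounds for A's `len(str(n))`
lemma pv_toDigits_bounds (m : Nat) :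
    m < 10 ^ (Nat.toDigits 10 m).length ∧
      (10 ≤ m → 10 ^ ((Nat.toDigits 10 m).length - 1) ≤ m) := by
  induction m using Nat.strong_induction_on with
  | _ m ih =>
    rw [pv_toDigits_len_rec m]
    by_cases h : m < 10
    · simp only [h, if_true]
      constructor
      · simpa using h
      · omega
    · simp only [h, if_false]
      have hdvd : m / 10 < m := Nat.div_lt_self (by omega) (by omega)
      obtain ⟨ub, lb⟩ := ih (m/10) hdvd
      set L' := (Nat.toDigits 10 (m/10)).length with hL'
      have hL1 : 1 ≤ L' := pv_toDigits_len_pos _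
      constructor
      · have : m < 10 * (m/10) + 10 := by omega
        calc m < 10 * (m/10) + 10 := this
          _ ≤ 10 * 10 ^ L' := by omega
          _ = 10 ^ (L' + 1) := by ring
      · intro _
        by_cases h10 : 10 ≤ m / 10
        · have := lb h10
          have h1 : 10 ^ (L' + 1 - 1) = 10 * 10 ^ (L' - 1) := by
            rw [show L' + 1 - 1 = (L' - 1) + 1 by omega]; ring
          have h2 : 10 * (m / 10) ≤ m := by omega
          calc 10 ^ (L' + 1 - 1) = 10 * 10 ^ (L' - 1) := h1
            _ ≤ 10 * (m / 10) := by omega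
            _ ≤ m := h2
        · have hL'1 : L' = 1 := by
            rw [hL', pv_toDigits_len_rec (m/10), if_pos (by omega)]
          rw [hL'1]
          simpa using h

lemma pv_A_iff (m : Nat) : (double_eights (m : Int) = true) ↔ pvP m := by
  induction m using Nat.strong_induction_on with
  | _ m ih =>
    rw [double_eights]
    rw [pv_toChars_cast m]
    simp only []
    obtain ⟨hub, hlb⟩ := pv_toDigits_bounds m
    have hL1 := pv_toDigits_len_pos m
    set L := (Nat.toDigits 10 m).length with hL
    have hcast1 : ((10:Int) ^ (L-1)) = (((10:Nat) ^ (L-1) : Nat) : Int) := by push_cast; ring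
    have hcast2 : ((10:Int) ^ (L-2)) = (((10:Nat) ^ (L-2) : Nat) : Int) := by push_cast; ring
    by_cases hL_1 : L = 1
    · rw [if_pos hL_1]
      have hm10 : m < 10 := by
        rw [hL_1] at hub; simpa using hub
      constructor
      · intro h; cases h
      · rintro ⟨k, _, h2⟩
        have : m / 10 ^ (k+1) = 0 := Nat.div_eq_of_lt (by
          calc m < 10 := hm10
            _ = 10 ^ 1 := (pow_one 10).symm
            _ ≤ 10 ^ (k+1) := Nat.pow_le_pow_right (by omega) (by omega))
        rw [this] at h2; omega
    · rw [if_neg hL_1]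
      have hL2 : 2 ≤ L := by omega
      have hm10 : 10 ≤ m := by
        by_contra hc
        have : L = 1 := by rw [hL, pv_toDigits_len_rec m, if_pos (by omega)]
        omega
      have hlow := hlb hm10
      set q := m / 10 ^ (L-1) with hq
      set r := m % 10 ^ (L-1) with hr
      have hrlt : r < 10 ^ (L-1) := Nat.mod_lt _ (by positivity)
      have hmeq : q * 10 ^ (L-1) + r = m := by
        rw [hq, hr, Nat.mul_comm]; exact Nat.div_add_mod m _
      have hq1 : 1 ≤ q := by
        rw [hq]; exact (Nat.one_le_div_iff (by positivity)).mpr hlow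
      have hq9 : q < 10 := by
        rw [hq]
        apply Nat.div_lt_of_lt_mul
        calc m < 10 ^ L := hub
          _ = 10 ^ (L-1) * 10 := by rw [← pow_succ]; congr 1; omega
      -- Int-level conditions → Nat-level
      rw [hcast1, hcast2, pv_fdiv_cast, pv_mod_cast, pv_fdiv_cast]
      have hdiv_m : ∀ j, j ≤ L - 1 → m / 10 ^ j = q * 10 ^ (L-1-j) + r / 10 ^ j := by
        intro j hj
        rw [← hmeq]
        rw [Nat.add_div_of_dvd_right (Dvd.dvd.mul_left (pow_dvd_pow 10 hj) q)]
        congr 1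
        rw [Nat.mul_div_assoc q (pow_dvd_pow 10 hj), Nat.pow_div hj (by omega)]
      have hmod10 : ∀ j, j ≤ L - 2 → m / 10 ^ j % 10 = r / 10 ^ j % 10 := by
        intro j hj
        rw [hdiv_m j (by omega)]
        have : 10 ^ (L-1-j) = 10 ^ (L-2-j) * 10 := by
          rw [← pow_succ]; congr 1; omega
        rw [this, ← Nat.mul_assoc]
        omega
      have hLsucc : L - 2 + 1 = L - 1 := by omega
      have htop : (q = 8 ∧ r / 10 ^ (L-2) = 8) ↔ pvPair m (L-2) := by
        unfold pvPair
        rw [hLsucc]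
        have e1 : m / 10 ^ (L-1) % 10 = q := by rw [← hq]; exact Nat.mod_eq_of_lt hq9
        have e2 : m / 10 ^ (L-2) % 10 = r / 10 ^ (L-2) := by
          rw [hmod10 (L-2) (by omega)]
          apply Nat.mod_eq_of_lt
          apply Nat.div_lt_of_lt_mul
          calc r < 10 ^ (L-1) := hrlt
            _ = 10 ^ (L-2) * 10 := by rw [← pow_succ]; congr 1; omega
        rw [e1, e2]
        tauto
      have hno_high : ∀ k, pvPair m k → k ≤ L - 2 := by
        rintro k ⟨_, h2⟩
        by_contra hc
        have : m / 10 ^ (k+1) = 0 := Nat.div_eq_of_lt (by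
          calc m < 10 ^ L := hub
            _ ≤ 10 ^ (k+1) := Nat.pow_le_pow_right (by omega) (by omega))
        rw [this] at h2; omega
      have hno_high_r : ∀ k, pvPair r k → k ≤ L - 3 := by
        rintro k ⟨_, h2⟩
        by_contra hc
        have : r / 10 ^ (k+1) = 0 := Nat.div_eq_of_lt (by
          calc r < 10 ^ (L-1) := hrlt
            _ ≤ 10 ^ (k+1) := Nat.pow_le_pow_right (by omega) (by omega))
        rw [this] at h2; omega
      have hpair_low : ∀ k, k + 1 ≤ L - 2 → (pvPair m k ↔ pvPair r k) := by
        intro k hk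
        unfold pvPair
        rw [hmod10 k (by omega), hmod10 (k+1) (by omega)]
      by_cases hC : ((q : Int) = 8 ∧ ((r / 10 ^ (L-2) : Nat) : Int) = 8)
      · rw [if_pos hC]
        obtain ⟨c1, c2⟩ := hC
        have : pvPair m (L-2) := htop.mp ⟨by exact_mod_cast c1, by exact_mod_cast c2⟩
        simp only [true_iff]
        exact ⟨L-2, this⟩
      · rw [if_neg hC]
        have hCn : ¬ (q = 8 ∧ r / 10 ^ (L-2) = 8) := by
          intro ⟨c1, c2⟩; exact hC ⟨by exact_mod_cast c1, by exact_mod_cast c2⟩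
        have hnotpair : ¬ pvPair m (L-2) := fun h => hCn (htop.mpr h)
        by_cases hL_2 : L = 2
        · rw [if_pos hL_2]
          constructor
          · intro h; cases h
          · rintro ⟨k, hk⟩
            have hk2 := hno_high k hk
            have : k = 0 := by omega
            subst this
            exact (hnotpair (by rwa [show L - 2 = 0 by omega])).elim
        · rw [if_neg hL_2]
          have hrm : r < m := lt_of_lt_of_le hrlt hlow
          have hL3 : 3 ≤ L := by omega
          rw [ih r hrm]
          constructor
          · rintro ⟨k, hk⟩
            have := hno_high_r k hk
            exact ⟨k, (hpair_low k (by omega)).mpr hk⟩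
          · rintro ⟨k, hk⟩
            have hk2 := hno_high k hk
            have hkne : k ≠ L - 2 := fun h => hnotpair (h ▸ hk)
            exact ⟨k, (hpair_low k (by omega)).mp hk⟩

-- ===== VERDICT (by name: the statement is the Claim_ definition above) =====
theorem double_eights_spec : Claim_equal_double_eights := by
  unfold Claim_equal_double_eights
  intro n _ hpre
  unfold Spec_double_eights
  obtain ⟨m, rfl⟩ : ∃ m : Nat, n = (m : Int) := ⟨n.toNat, (Int.toNat_of_nonneg hpre).symm⟩
  unfold double_eights_alt
  rw [Bool.eq_iff_iff, pv_A_iff, pv_deLoop_iff]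
  simp
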